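-- pv_equiv track=rewrite | github.com/pip-benchmark/pip-benchmark-python | pip_benchmark_python/utilities/PropertyFileLine.py | __index_of_comment
-- ===== SOURCE A (Python) =====
-- def __index_of_comment(value):
--     part_of_string = False
--     string_delimiter = ' '
--     for index in range(len(value)):
--         chr = value[index]
--         if part_of_string is False and chr == ';':
--             return index
--         elif part_of_string is True and chr == string_delimiter:
--             part_of_string = False
--         elif part_of_string is False and (chr == '\'' or chr == '\"'):
--             part_of_string = True
--             string_delimiter = chr
--
--     return -1
-- ===== SOURCE B (Python) =====
-- def __index_of_comment(value):
--     i = 0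
--     n = len(value)
--     while i < n:
--         ch = value[i]
--         if ch == ';':
--             return i
--         if ch == "'" or ch == '"':
--             j = value.find(ch, i + 1)
--             if j == -1:
--                 return -1
--             i = j + 1
--         else:
--             i += 1
--     return -1
-- ===== Notes on version B (the rewrite author's own statement) =====
-- stated objective: alternative
-- what changed: Replaces A's per-character state machine (part_of_string flag + remembered delimiter) with a while loop over an explicit index that, on meeting a quote, jumps past the whole quoted region with one str.find call (returning -1 immediately on an unterminated quote).
import Mathlib
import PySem

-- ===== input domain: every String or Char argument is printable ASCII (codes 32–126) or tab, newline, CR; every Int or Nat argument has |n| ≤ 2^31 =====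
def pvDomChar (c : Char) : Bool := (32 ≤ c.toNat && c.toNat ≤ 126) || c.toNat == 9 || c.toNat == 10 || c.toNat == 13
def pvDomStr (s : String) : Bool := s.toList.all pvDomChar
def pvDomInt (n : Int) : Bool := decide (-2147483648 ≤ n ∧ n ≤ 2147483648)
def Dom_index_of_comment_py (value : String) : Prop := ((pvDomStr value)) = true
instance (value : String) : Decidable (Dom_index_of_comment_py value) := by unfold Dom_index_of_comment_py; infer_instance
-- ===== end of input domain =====

-- B replaces A's per-character part_of_string/delimiter state machine with a while loop
-- that jumps over each quoted region in one str.find call (objective: alternative).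

-- ===== PORT A =====
-- A's for-loop over indices: structural recursion carrying (index, part_of_string, string_delimiter).
def pvAGo : List Char → Int → Bool → Char → Int
  | [], _, _, _ => -1
  | c :: rest, idx, pos, delim =>
    if pos = false ∧ c = ';' then idx
    else if pos = true ∧ c = delim then pvAGo rest (idx + 1) false delim
    else if pos = false ∧ (c = '\'' ∨ c = '"') then pvAGo rest (idx + 1) true c
    else pvAGo rest (idx + 1) pos delim

def index_of_comment_py (value : String) : Int :=
  pvAGo value.toList 0 false ' '

-- ===== PORT B =====
-- B's while loop; value.find(ch, i+1) on the remaining suffix is List.findIdx? (first index of ch).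
def pvBGo : List Char → Int → Int
  | [], _ => -1
  | c :: rest, idx =>
    if c = ';' then idx
    else if c = '\'' ∨ c = '"' then
      match rest.findIdx? (· = c) with
      | none => -1
      | some j => pvBGo (rest.drop (j + 1)) (idx + (j : Int) + 2)
    else pvBGo rest (idx + 1)
termination_by l _ => l.length
decreasing_by
  · simp
  · simp

def index_of_comment_py_alt (value : String) : Int :=
  pvBGo value.toList 0

-- ===== PRECONDITION & SPEC =====
def Spec_index_of_comment_py (value : String) (out : Int) : Prop := out = index_of_comment_py_alt value
instance (value : String) (out : Int) : Decidable (Spec_index_of_comment_py value out) := by unfold Spec_index_of_comment_py; infer_instance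

-- ===== CLAIM (what is proved, stated in full; the proofs are below) =====
def Claim_equal_index_of_comment_py : Prop := ∀ (value : String), Dom_index_of_comment_py value → Spec_index_of_comment_py value (index_of_comment_py value)

-- ===== LEMMAS AND PROOFS =====

-- Inside a quoted region A just scans for the delimiter: its result is determined by the
-- first occurrence of `delim` (none → -1; at j → resume out-of-string after it).
theorem pvAGo_inString (l : List Char) (idx : Int) (delim : Char) :
    pvAGo l idx true delim =
      match l.findIdx? (· = delim) with
      | none => -1
      | some j => pvAGo (l.drop (j + 1)) (idx + (j : Int) + 1) false delim := by
  induction l generalizing idx with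
  | nil => simp [pvAGo]
  | cons c rest ih =>
    by_cases h : c = delim
    · subst h
      simp [pvAGo, List.findIdx?_cons]
    · rw [List.findIdx?_cons]
      simp only [decide_eq_true_eq, h, if_false]
      have hstep : pvAGo (c :: rest) idx true delim = pvAGo rest (idx + 1) true delim := by
        simp [pvAGo, h]
      rw [hstep, ih]
      cases hf : rest.findIdx? (· = delim) with
      | none => simp
      | some j =>
        simp only [Option.map_some, List.drop_succ_cons]
        push_cast
        ring_nf

theorem pvAGo_eq_pvBGo (n : Nat) (l : List Char) (idx : Int) (delim : Char)
    (hl : l.length ≤ n) : pvAGo l idx false delim = pvBGo l idx := by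
  induction n generalizing l idx delim with
  | zero =>
    have : l = [] := by cases l <;> simp_all
    subst this; simp [pvAGo, pvBGo]
  | succ n ih =>
    cases l with
    | nil => simp [pvAGo, pvBGo]
    | cons c rest =>
      by_cases hsemi : c = ';'
      · subst hsemi; simp [pvAGo, pvBGo]
      · by_cases hq : c = '\'' ∨ c = '"'
        · have hA : pvAGo (c :: rest) idx false delim = pvAGo rest (idx + 1) true c := by
            simp [pvAGo, hsemi, hq]
          have hB : pvBGo (c :: rest) idx =
              match rest.findIdx? (· = c) with
              | none => -1
              | some j => pvBGo (rest.drop (j + 1)) (idx + (j : Int) + 2) := by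
            rw [pvBGo]; simp [hsemi, hq]
          rw [hA, hB, pvAGo_inString]
          cases hf : rest.findIdx? (· = c) with
          | none => simp
          | some j =>
            have hlen : (rest.drop (j + 1)).length ≤ n := by
              simp at hl ⊢; omega
            simp only []
            rw [ih (rest.drop (j + 1)) (idx + 1 + (j : Int) + 1) c hlen]
            congr 1
            ring
        · have hA : pvAGo (c :: rest) idx false delim = pvAGo rest (idx + 1) false delim := by
            simp [pvAGo, hsemi, hq]
          have hB : pvBGo (c :: rest) idx = pvBGo rest (idx + 1) := by
            rw [pvBGo]; simp [hsemi, hq]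
          rw [hA, hB]
          exact ih rest (idx + 1) delim (by simp at hl ⊢; omega)

-- ===== VERDICT (by name: the statement is the Claim_ definition above) =====
theorem index_of_comment_py_spec : Claim_equal_index_of_comment_py := by
  intro value _
  unfold Spec_index_of_comment_py index_of_comment_py index_of_comment_py_alt
  exact pvAGo_eq_pvBGo value.toList.length value.toList 0 ' ' le_rfl
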